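-- pv_equiv track=rewrite | github.com/ceriu5/forgotten-wisdom | divination/sarah_fm2.5.py | get_ogdoad_aspect
-- ===== SOURCE A (Python) =====
-- def get_ogdoad_aspect(geomantic, iching, tarot):
--     """Get ogdoad aspect for combined reading"""
--     elements = [
--         geomantic.get('element', ''),
--         iching['primary'].get('element', ''),
--         tarot.get('element', '')
--     ]
--
--     if all('Fire' in e or e == 'Fire' for e in elements if e):
--         return "Creative fire principle"
--     elif all('Water' in e or e == 'Water' for e in elements if e):
--         return "Receptive water principle"
--     elif all('Air' in e or e == 'Air' for e in elements if e):
--         return "Mediating air principle"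
--     elif all('Earth' in e or e == 'Earth' for e in elements if e):
--         return "Manifesting earth principle"
--
--     return "Unified manifestation principle"
-- ===== SOURCE B (Python) =====
-- _KEYWORDS = ('Fire', 'Water', 'Air', 'Earth')
-- _MESSAGES = ("Creative fire principle", "Receptive water principle",
--              "Mediating air principle", "Manifesting earth principle")
--
-- def _element_mask(e):
--     """Bitmask of which keywords occur in e (bit i <-> _KEYWORDS[i])."""
--     mask = 0
--     bit = 1
--     for kw in _KEYWORDS:
--         if kw in e:
--             mask |= bit
--         bit <<= 1
--     return mask
--
-- def get_ogdoad_aspect(geomantic, iching, tarot):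
--     """Get ogdoad aspect for combined reading"""
--     elements = [
--         geomantic.get('element', ''),
--         iching['primary'].get('element', ''),
--         tarot.get('element', '')
--     ]
--     mask = 0b1111
--     for e in elements:
--         if e:
--             mask &= _element_mask(e)
--     bit = 1
--     for msg in _MESSAGES:
--         if mask & bit:
--             return msg
--         bit <<= 1
--     return "Unified manifestation principle"
-- ===== Notes on version B (the rewrite author's own statement) =====
-- stated objective: alternative
-- what changed: Instead of testing each keyword against all elements in an if/elif chain, B makes one pass per element computing a bitmask of contained keywords, intersects the masks with bitwise AND, and returns the message for the lowest set bit; the redundant 'or e == kw' test is dropped since a string contains itself.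
import Mathlib
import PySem

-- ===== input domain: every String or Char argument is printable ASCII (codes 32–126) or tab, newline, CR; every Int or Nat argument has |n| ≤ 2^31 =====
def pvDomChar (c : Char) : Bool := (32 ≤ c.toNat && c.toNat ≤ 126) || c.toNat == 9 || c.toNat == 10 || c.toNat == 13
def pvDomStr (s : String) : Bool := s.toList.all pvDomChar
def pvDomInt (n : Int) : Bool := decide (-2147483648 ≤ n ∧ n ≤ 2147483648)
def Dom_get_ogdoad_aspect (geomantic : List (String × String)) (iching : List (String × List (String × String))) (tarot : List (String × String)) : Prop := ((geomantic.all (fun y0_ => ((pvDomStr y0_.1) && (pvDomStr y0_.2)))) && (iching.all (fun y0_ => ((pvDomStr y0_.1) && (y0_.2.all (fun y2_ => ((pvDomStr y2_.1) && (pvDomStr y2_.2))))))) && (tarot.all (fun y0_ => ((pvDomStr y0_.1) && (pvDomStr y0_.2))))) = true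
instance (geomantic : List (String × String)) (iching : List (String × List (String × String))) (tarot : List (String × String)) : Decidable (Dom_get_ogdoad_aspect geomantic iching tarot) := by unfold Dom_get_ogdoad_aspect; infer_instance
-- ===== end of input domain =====

-- B replaces A's per-keyword if/elif chain by one bitmask per element, intersected with
-- bitwise AND, then picks the message of the lowest set bit; same return values wherever A returns.

-- ===== PORT A =====
-- all('<kw>' in e or e == '<kw>' for e in elements if e)
def pvACond (elements : List String) (kw : String) : Bool :=
  (elements.filter (fun e => !(e == ""))).all
    (fun e => PySem.Str.isIn kw e || e == kw)

def get_ogdoad_aspect (geomantic : List (String × String)) (iching : List (String × List (String × String))) (tarot : List (String × String)) : String :=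
  -- iching['primary'] raises KeyError when absent: excluded by Pre_; the [] default below is never reached under Pre_
  let primary := ((PySem.Dict.mk iching).get? "primary").getD []
  let elements := [ (PySem.Dict.mk geomantic).getD "element" ""
                  , (PySem.Dict.mk primary).getD "element" ""
                  , (PySem.Dict.mk tarot).getD "element" "" ]
  if pvACond elements "Fire" then "Creative fire principle"
  else if pvACond elements "Water" then "Receptive water principle"
  else if pvACond elements "Air" then "Mediating air principle"
  else if pvACond elements "Earth" then "Manifesting earth principle"
  else "Unified manifestation principle"

-- ===== PORT B =====
def pvKeywords : List String := ["Fire", "Water", "Air", "Earth"]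
def pvMessages : List String :=
  [ "Creative fire principle", "Receptive water principle"
  , "Mediating air principle", "Manifesting earth principle" ]

-- _element_mask: loop over keywords carrying (mask, bit)
def pvElemMask (e : String) : Nat :=
  (pvKeywords.foldl
    (fun (p : Nat × Nat) kw => ((if PySem.Str.isIn kw e then p.1 ||| p.2 else p.1), p.2 <<< 1))
    (0, 1)).1

-- for e in elements: if e: mask &= _element_mask(e)
def pvCombine (elements : List String) : Nat :=
  elements.foldl (fun m e => if e == "" then m else m &&& pvElemMask e) 15

-- for msg in _MESSAGES: if mask & bit: return msg; bit <<= 1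
def pvSelect (mask : Nat) : Nat → List String → String
  | _, [] => "Unified manifestation principle"
  | bit, msg :: rest => if mask &&& bit != 0 then msg else pvSelect mask (bit <<< 1) rest

def get_ogdoad_aspect_alt (geomantic : List (String × String)) (iching : List (String × List (String × String))) (tarot : List (String × String)) : String :=
  let primary := ((PySem.Dict.mk iching).get? "primary").getD []
  let elements := [ (PySem.Dict.mk geomantic).getD "element" ""
                  , (PySem.Dict.mk primary).getD "element" ""
                  , (PySem.Dict.mk tarot).getD "element" "" ]
  pvSelect (pvCombine elements) 1 pvMessages

-- ===== PRECONDITION & SPEC =====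
-- Pre_ excludes exactly the inputs where Python A raises KeyError: iching lacking the 'primary' key.
def Pre_get_ogdoad_aspect (geomantic : List (String × String)) (iching : List (String × List (String × String))) (tarot : List (String × String)) : Prop :=
  (PySem.Dict.mk iching).contains "primary" = true
instance (geomantic : List (String × String)) (iching : List (String × List (String × String))) (tarot : List (String × String)) : Decidable (Pre_get_ogdoad_aspect geomantic iching tarot) := by unfold Pre_get_ogdoad_aspect; infer_instance

def pvWitness_get_ogdoad_aspect : (List (String × String)) × (List (String × List (String × String))) × (List (String × String)) :=
  ([("element", "Fire")], [("primary", [("element", "Fire")])], [("element", "Water")])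

def Spec_get_ogdoad_aspect (geomantic : List (String × String)) (iching : List (String × List (String × String))) (tarot : List (String × String)) (out : String) : Prop := out = get_ogdoad_aspect_alt geomantic iching tarot
instance (geomantic : List (String × String)) (iching : List (String × List (String × String))) (tarot : List (String × String)) (out : String) : Decidable (Spec_get_ogdoad_aspect geomantic iching tarot out) := by unfold Spec_get_ogdoad_aspect; infer_instance

-- ===== CLAIM (what is proved, stated in full; the proofs are below) =====
def Claim_equal_get_ogdoad_aspect : Prop := ∀ (geomantic : List (String × String)) (iching : List (String × List (String × String))) (tarot : List (String × String)), Dom_get_ogdoad_aspect geomantic iching tarot → Pre_get_ogdoad_aspect geomantic iching tarot → Spec_get_ogdoad_aspect geomantic iching tarot (get_ogdoad_aspect geomantic iching tarot)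

-- ===== LEMMAS AND PROOFS =====

-- abbreviation for "all nonempty elements contain kw" (B-side condition, filter-free form)
def pvAllIn (elements : List String) (kw : String) : Bool :=
  elements.all (fun e => e == "" || PySem.Str.isIn kw e)

-- a string is a substring of itself, so A's 'kw in e or e == kw' equals 'kw in e'
theorem pvOr_redundant (kw e : String) :
    (PySem.Chars.isIn kw.toList e.toList || e == kw) = PySem.Chars.isIn kw.toList e.toList := by
  by_cases h : e = kw
  · subst h
    have h2 : PySem.Chars.isIn e.toList e.toList = true :=
      (PySem.Chars.isIn_iff_infix _ _).mpr (List.infix_refl _)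
    simp [h2]
  · simp [h]

-- A's filtered condition equals the filter-free all
theorem pvACond_eq (elements : List String) (kw : String) :
    pvACond elements kw = pvAllIn elements kw := by
  unfold pvACond pvAllIn
  induction elements with
  | nil => rfl
  | cons e rest ih =>
    by_cases h : e = ""
    · subst h; simpa using ih
    · have hb : (!e == "") = true := by simp [h]
      simp only [List.filter_cons, hb, if_pos, List.all_cons]
      simp only [PySem.Str.isIn_eq] at ih ⊢
      rw [ih, pvOr_redundant]
      have he : (e == "") = false := by simp [h]
      rw [he]; simp

-- bits 0..3 of an element's mask say which keywords occur in the element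
theorem pvElemMask_bits (e : String) :
    (pvElemMask e).testBit 0 = PySem.Str.isIn "Fire" e
  ∧ (pvElemMask e).testBit 1 = PySem.Str.isIn "Water" e
  ∧ (pvElemMask e).testBit 2 = PySem.Str.isIn "Air" e
  ∧ (pvElemMask e).testBit 3 = PySem.Str.isIn "Earth" e := by
  unfold pvElemMask pvKeywords
  simp only [List.foldl, PySem.Str.isIn_eq]
  by_cases hf : PySem.Chars.isIn ['F', 'i', 'r', 'e'] e.toList = true <;>
  by_cases hw : PySem.Chars.isIn ['W', 'a', 't', 'e', 'r'] e.toList = true <;>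
  by_cases ha : PySem.Chars.isIn ['A', 'i', 'r'] e.toList = true <;>
  by_cases he : PySem.Chars.isIn ['E', 'a', 'r', 't', 'h'] e.toList = true <;>
    simp [hf, hw, ha, he] <;> decide

-- bit i of the intersected mask says: every nonempty element contains the i-th keyword
theorem pvCombine_bit (elements : List String) (i : Nat) (kw : String)
    (hkw : ∀ e, (pvElemMask e).testBit i = PySem.Str.isIn kw e)
    (h15 : Nat.testBit 15 i = true) :
    (pvCombine elements).testBit i = pvAllIn elements kw := by
  unfold pvCombine pvAllIn
  suffices H : ∀ (m : Nat),
      (elements.foldl (fun m e => if e == "" then m else m &&& pvElemMask e) m).testBit i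
        = (m.testBit i && elements.all (fun e => e == "" || PySem.Str.isIn kw e)) by
    rw [H 15, h15, Bool.true_and]
  intro m
  induction elements generalizing m with
  | nil => simp
  | cons e rest ih =>
    simp only [List.foldl, List.all_cons]
    cases he : (e == "") with
    | true =>
      simp only [Bool.true_or, Bool.true_and, reduceIte]
      rw [ih]
    | false =>
      simp only [Bool.false_or, if_neg Bool.false_ne_true]
      rw [ih, Nat.testBit_land, hkw e, Bool.and_assoc]

-- 'mask & 2^i != 0' is exactly testBit
theorem pvAnd_pow_ne (m i : Nat) : (m &&& (2 ^ i) != 0) = m.testBit i := by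
  rw [Nat.and_two_pow]
  cases h : m.testBit i
  · simp
  · simp

-- the core equality: A's if/elif chain equals B's bit selection, for any element list
theorem pvMain (elements : List String) :
    (if pvACond elements "Fire" then "Creative fire principle"
     else if pvACond elements "Water" then "Receptive water principle"
     else if pvACond elements "Air" then "Mediating air principle"
     else if pvACond elements "Earth" then "Manifesting earth principle"
     else "Unified manifestation principle")
      = pvSelect (pvCombine elements) 1 pvMessages := by
  have h0 : (pvCombine elements &&& 1 != 0) = pvAllIn elements "Fire" := by
    rw [show (1 : Nat) = 2 ^ 0 from rfl, pvAnd_pow_ne,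
        pvCombine_bit elements 0 "Fire" (fun e => (pvElemMask_bits e).1) (by decide)]
  have h1 : (pvCombine elements &&& 2 != 0) = pvAllIn elements "Water" := by
    rw [show (2 : Nat) = 2 ^ 1 from rfl, pvAnd_pow_ne,
        pvCombine_bit elements 1 "Water" (fun e => (pvElemMask_bits e).2.1) (by decide)]
  have h2 : (pvCombine elements &&& 4 != 0) = pvAllIn elements "Air" := by
    rw [show (4 : Nat) = 2 ^ 2 from rfl, pvAnd_pow_ne,
        pvCombine_bit elements 2 "Air" (fun e => (pvElemMask_bits e).2.2.1) (by decide)]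
  have h3 : (pvCombine elements &&& 8 != 0) = pvAllIn elements "Earth" := by
    rw [show (8 : Nat) = 2 ^ 3 from rfl, pvAnd_pow_ne,
        pvCombine_bit elements 3 "Earth" (fun e => (pvElemMask_bits e).2.2.2) (by decide)]
  simp only [pvSelect, pvMessages,
    show (1 : Nat) <<< 1 = 2 from rfl, show (2 : Nat) <<< 1 = 4 from rfl,
    show (4 : Nat) <<< 1 = 8 from rfl]
  rw [h0, h1, h2, h3, pvACond_eq, pvACond_eq, pvACond_eq, pvACond_eq]

-- ===== VERDICT (by name: the statement is the Claim_ definition above) =====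
theorem get_ogdoad_aspect_spec : Claim_equal_get_ogdoad_aspect := by
  intro geomantic iching tarot _ _
  unfold Spec_get_ogdoad_aspect get_ogdoad_aspect get_ogdoad_aspect_alt
  exact pvMain _
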